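-- pv_equiv track=rewrite | github.com/AYUSHMAAN974/DSA_practice | megaprime.py | megaprime_count
-- ===== SOURCE A (Python) =====
-- def isprime(n):
--     if n < 2:
--         return False
--     for i in range(2, int(n ** 0.5) + 1):
--         if n % i == 0:
--             return False
--     return True
--
-- def megaprime_count(a, b):
--     count = 0
--     for j in range(a, b + 1):
--         if isprime(j):
--             newlist = list(str(j))
--             for k in newlist:
--                 if not isprime(int(k)):
--                     break
--             else:
--                 count += 1
--     return count
-- ===== SOURCE B (Python) =====
-- def _is_prime(n):
--     if n < 2:
--         return False
--     d = 2
--     while d * d <= n: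
--         if n % d == 0:
--             return False
--         d += 1
--     return True
--
-- def megaprime_count(a, b):
--     # DFS over numbers built only from the prime digits 2,3,5,7 (the only
--     # candidates whose digits are all prime), pruned at b; primality-test each.
--     def go(c):
--         total = 0
--         for d in (2, 3, 5, 7):
--             x = c * 10 + d
--             if x <= b:
--                 if x >= a and _is_prime(x):
--                     total += 1
--                 total += go(x)
--         return total
--     return go(0)
-- ===== Notes on version B (the rewrite author's own statement) =====
-- stated objective: alternative
-- what changed: Instead of scanning every integer in [a,b] and primality-testing each, B generates only the numbers whose decimal digits are all in {2,3,5,7} (a DFS appending prime digits, pruned at b) and primality-tests just those candidates.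
import Mathlib
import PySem

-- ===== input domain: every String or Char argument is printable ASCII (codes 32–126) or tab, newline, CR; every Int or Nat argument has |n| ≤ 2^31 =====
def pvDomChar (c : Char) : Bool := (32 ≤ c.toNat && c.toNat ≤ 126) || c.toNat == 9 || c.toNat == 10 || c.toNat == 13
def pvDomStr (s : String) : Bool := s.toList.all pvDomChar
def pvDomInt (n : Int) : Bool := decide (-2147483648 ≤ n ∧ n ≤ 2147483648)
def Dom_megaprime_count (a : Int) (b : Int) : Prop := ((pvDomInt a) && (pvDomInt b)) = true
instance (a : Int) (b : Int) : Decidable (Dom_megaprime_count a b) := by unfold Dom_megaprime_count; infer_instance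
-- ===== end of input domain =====

-- B replaces A's scan of every j in [a,b] by a DFS over the numbers built only from
-- the prime digits 2,3,5,7 (the only possible answers), primality-testing just those.

-- ===== PORT A =====
-- A's `for i in range(2, int(n**0.5)+1)` trial-division loop with early return.
-- int(n ** 0.5) is ported as Nat.sqrt n.toNat: exact on the stated domain (|n| ≤ 2^31).
def trialA (n : Int) : List Int → Bool
  | [] => true
  | i :: rest => if PySem.Int.mod n i == 0 then false else trialA n rest

def isprimeA (n : Int) : Bool :=
  if n < 2 then false
  else trialA n (PySem.List.pyRange 2 ((Nat.sqrt n.toNat : Int) + 1))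

-- A's `for k in newlist: … break / else:` loop over the characters of str(j);
-- int(k) is PySem.Int.ofChars? [k] — k is always a decimal digit char where this runs
-- (j has already passed isprime, so j ≥ 2 and str(j) has no sign), so `.getD 0` never fires.
def digitsOK : List Char → Bool
  | [] => true
  | k :: rest =>
    if !(isprimeA ((PySem.Int.ofChars? [k]).getD 0)) then false else digitsOK rest

def megaprime_count (a : Int) (b : Int) : Int :=
  (PySem.List.pyRange a (b + 1)).foldl
    (fun count j =>
      if isprimeA j then
        if digitsOK (PySem.Int.toChars j) then count + 1 else count
      else count) 0

-- ===== PORT B =====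
-- B's `while d * d <= n:` trial-division loop; the fuel n.toNat + 2 is never exhausted
-- (the loop runs at most √n + 1 times).
def trialB : Nat → Int → Int → Bool
  | 0, _, _ => true
  | f + 1, n, d =>
    if d * d ≤ n then
      (if PySem.Int.mod n d == 0 then false else trialB f n (d + 1))
    else true

def isprimeB (n : Int) : Bool :=
  if n < 2 then false else trialB (n.toNat + 2) n 2

-- B's recursive `go(c)`: extend c by each prime digit, prune at b, count primes in [a,b].
-- The fuel b.toNat + 1 is never exhausted (the DFS depth is at most the number of digits of b).
def goB : Nat → Int → Int → Int → Int
  | 0, _, _, _ => 0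
  | f + 1, a, b, c =>
    [2, 3, 5, 7].foldl (fun total d =>
      let x := c * 10 + d
      if x ≤ b then
        (if a ≤ x && isprimeB x then total + 1 else total) + goB f a b x
      else total) 0

def megaprime_count_alt (a : Int) (b : Int) : Int :=
  goB (b.toNat + 1) a b 0

-- ===== PRECONDITION & SPEC =====
def Spec_megaprime_count (a : Int) (b : Int) (out : Int) : Prop := out = megaprime_count_alt a b
instance (a : Int) (b : Int) (out : Int) : Decidable (Spec_megaprime_count a b out) := by unfold Spec_megaprime_count; infer_instance

-- ===== CLAIM (what is proved, stated in full; the proofs are below) =====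
def Claim_equal_megaprime_count : Prop := ∀ (a : Int) (b : Int), Dom_megaprime_count a b → Spec_megaprime_count a b (megaprime_count a b)

-- ===== LEMMAS AND PROOFS =====

-- `descN c x` : x arises from c by appending ≥ 1 decimal digits, all of them in {2,3,5,7}
def descN (c : Nat) (x : Nat) : Bool :=
  if h : x = 0 then false
  else ((x % 10 == 2) || (x % 10 == 3) || (x % 10 == 5) || (x % 10 == 7))
       && ((x / 10 == c) || descN c (x / 10))
termination_by x
decreasing_by exact Nat.div_lt_self (Nat.pos_of_ne_zero h) (by norm_num)

-- decimal digit characters of n, most significant first (what Nat.toDigits 10 computes)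
def dchars (n : Nat) : List Char :=
  if n < 10 then [Nat.digitChar n]
  else dchars (n / 10) ++ [Nat.digitChar (n % 10)]
termination_by n
decreasing_by exact Nat.div_lt_self (by omega) (by norm_num)

-- the set of mega-primes in [a,b] that descend from c
def FS (a b c : Int) : Finset ℤ :=
  ((PySem.List.pyRange a (b + 1)).filter
    (fun y => descN c.toNat y.toNat && isprimeB y)).toFinset

-- the part of FS below one child c (the child itself, if it qualifies, plus its descendants)
def GS (a b x : Int) : Finset ℤ :=
  ((PySem.List.pyRange a (b + 1)).filter
    (fun y => (decide (y = x) || descN x.toNat y.toNat) && isprimeB y)).toFinset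

-- contribution of one child x to B's loop body
def contrib (f : Nat) (a b x : Int) : Int :=
  if x ≤ b then (if a ≤ x && isprimeB x then (1:Int) else 0) + goB f a b x else 0

lemma mem_FS (a b c y : Int) :
    y ∈ FS a b c ↔ (a ≤ y ∧ y ≤ b) ∧ (descN c.toNat y.toNat = true ∧ isprimeB y = true) := by
  simp only [FS, List.mem_toFinset, List.mem_filter, PySem.List.mem_pyRange_one,
    Bool.and_eq_true]
  constructor <;> intro h <;> exact ⟨⟨h.1.1, by omega⟩, h.2⟩

lemma mem_GS (a b x y : Int) :
    y ∈ GS a b x ↔ (a ≤ y ∧ y ≤ b) ∧ ((y = x ∨ descN x.toNat y.toNat = true) ∧ isprimeB y = true) := by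
  simp only [GS, List.mem_toFinset, List.mem_filter, PySem.List.mem_pyRange_one,
    Bool.and_eq_true, Bool.or_eq_true, decide_eq_true_eq]
  constructor <;> intro h <;> exact ⟨⟨h.1.1, by omega⟩, h.2⟩

lemma trialA_eq_all (n : Int) (l : List Int) :
    trialA n l = l.all (fun i => !(PySem.Int.mod n i == 0)) := by
  induction l with
  | nil => rfl
  | cons i rest ih => by_cases h : PySem.Int.mod n i == 0 <;> simp [trialA, h, ih]

lemma trialB_eq (n : Int) (hn : 0 ≤ n) :
    ∀ (f : Nat) (d : Int), 0 ≤ d → Nat.sqrt n.toNat + 1 ≤ f + d.toNat →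
      trialB f n d
        = (PySem.List.pyRange d ((Nat.sqrt n.toNat : Int) + 1)).all
            (fun i => !(PySem.Int.mod n i == 0)) := by
  intro f
  induction f with
  | zero =>
    intro d hd hf
    have : ((Nat.sqrt n.toNat : Int) + 1) ≤ d := by omega
    rw [PySem.List.pyRange_one_eq_nil this]
    rfl
  | succ f ih =>
    intro d hd hf
    have hcast : (d * d ≤ n) ↔ d.toNat * d.toNat ≤ n.toNat := by
      rw [← Int.toNat_of_nonneg hd, ← Int.toNat_of_nonneg hn]
      exact_mod_cast Iff.rfl
    have hdd : (d * d ≤ n) ↔ d.toNat ≤ Nat.sqrt n.toNat := by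
      rw [hcast, ← Nat.le_sqrt]
    by_cases h : d * d ≤ n
    · have hlt : d < (Nat.sqrt n.toNat : Int) + 1 := by
        have := hdd.mp h; omega
      rw [PySem.List.pyRange_one_cons hlt]
      simp only [trialB, if_pos h, List.all_cons]
      by_cases hm : PySem.Int.mod n d == 0
      · simp [hm]
      · rw [ih (d+1) (by omega) (by have := hdd.mp h; omega)]
        simp [hm]
    · have hge : ((Nat.sqrt n.toNat : Int) + 1) ≤ d := by
        have := hdd.not.mp h; omega
      rw [PySem.List.pyRange_one_eq_nil hge]
      simp [trialB, h]

lemma isprime_eq (n : Int) : isprimeA n = isprimeB n := by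
  unfold isprimeA isprimeB
  by_cases h : n < 2
  · simp [h]
  · rw [if_neg h, if_neg h, trialA_eq_all,
      trialB_eq n (by omega) (n.toNat + 2) 2 (by omega)
        (by have := Nat.sqrt_le_self n.toNat; omega)]

lemma isprimeB_two_le (n : Int) (h : isprimeB n = true) : 2 ≤ n := by
  by_contra hc
  unfold isprimeB at h
  rw [if_pos (by omega)] at h
  exact absurd h (by simp)

lemma toDigitsCore_eq : ∀ (f n : Nat) (ds : List Char), n < f →
    Nat.toDigitsCore 10 f n ds = dchars n ++ ds := by
  intro f
  induction f with
  | zero => omega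
  | succ f ih =>
    intro n ds hf
    rw [Nat.toDigitsCore]
    by_cases h : n / 10 = 0
    · have h10 : n < 10 := by omega
      rw [if_pos h]
      have hm : n % 10 = n := Nat.mod_eq_of_lt h10
      conv_rhs => rw [dchars, if_pos h10]
      rw [hm]
      rfl
    · have h10 : ¬ n < 10 := by omega
      simp only [if_neg h]
      rw [ih (n / 10) _ (by omega)]
      conv_rhs => rw [dchars]
      simp [h10]

lemma toChars_nonneg (x : Int) (hx : 0 ≤ x) : PySem.Int.toChars x = dchars x.toNat := by
  unfold PySem.Int.toChars
  rw [if_neg (by omega)]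
  unfold Nat.toDigits
  rw [toDigitsCore_eq _ _ _ (by omega), List.append_nil]

lemma digitsOK_append (l1 l2 : List Char) :
    digitsOK (l1 ++ l2) = (digitsOK l1 && digitsOK l2) := by
  induction l1 with
  | nil => simp [digitsOK]
  | cons k rest ih =>
    simp only [List.cons_append, digitsOK]
    by_cases h : isprimeA ((PySem.Int.ofChars? [k]).getD 0) <;> simp [h, ih]

lemma digitsOK_single (k : Char) :
    digitsOK [k] = isprimeA ((PySem.Int.ofChars? [k]).getD 0) := by
  rw [digitsOK]
  cases h : isprimeA ((PySem.Int.ofChars? [k]).getD 0) <;> simp [h] <;> rfl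

lemma digitsOK_digitChar (m : Nat) (hm : m < 10) :
    digitsOK [Nat.digitChar m] = (m == 2 || m == 3 || m == 5 || m == 7) := by
  rw [digitsOK_single, isprime_eq]
  interval_cases m <;> decide

lemma digitsOK_dchars : ∀ n : Nat, 0 < n → digitsOK (dchars n) = descN 0 n := by
  intro n
  induction n using Nat.strong_induction_on with
  | _ n ih =>
    intro hn
    by_cases h : n < 10
    · rw [dchars, if_pos h, digitsOK_digitChar n h, descN]
      rw [dif_neg (by omega)]
      have : n % 10 = n := Nat.mod_eq_of_lt h
      have h0 : n / 10 = 0 := by omega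
      rw [this, h0]
      simp
    · rw [dchars, if_neg h, digitsOK_append,
        ih (n / 10) (Nat.div_lt_self (by omega) (by norm_num)) (by omega),
        digitsOK_digitChar (n % 10) (by omega)]
      have h0 : ¬ (n / 10 = 0) := by omega
      have h1 : ((n / 10 == 0) : Bool) = false := by simpa using h0
      conv_rhs => rw [descN]
      rw [dif_neg (show ¬ (n = 0) by omega), h1, Bool.false_or]
      exact Bool.and_comm ..

lemma descN_iff (c x : Nat) (hx : x ≠ 0) :
    descN c x = true ↔
      ((x % 10 = 2 ∨ x % 10 = 3 ∨ x % 10 = 5 ∨ x % 10 = 7) ∧ (x / 10 = c ∨ descN c (x / 10) = true)) := by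
  conv_lhs => rw [descN]
  rw [dif_neg hx]
  simp only [Bool.and_eq_true, Bool.or_eq_true, beq_iff_eq]
  tauto

lemma descN_lb : ∀ (x c : Nat), descN c x = true → 10 * c + 2 ≤ x := by
  intro x
  induction x using Nat.strong_induction_on with
  | _ x ih =>
    intro c h
    have hx : x ≠ 0 := by intro he; rw [he, descN] at h; simp at h
    rw [descN_iff c x hx] at h
    obtain ⟨hd, hc⟩ := h
    rcases hc with hc | hc
    · omega
    · have := ih (x / 10) (Nat.div_lt_self (by omega) (by norm_num)) c hc
      omega

lemma descN_chain : ∀ (x c : Nat), descN c x = true → ∃ k, 0 < k ∧ c = x / 10 ^ k := by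
  intro x
  induction x using Nat.strong_induction_on with
  | _ x ih =>
    intro c h
    have hx : x ≠ 0 := by intro he; rw [he, descN] at h; simp at h
    rw [descN_iff c x hx] at h
    obtain ⟨hd, hc⟩ := h
    rcases hc with hc | hc
    · refine ⟨1, by omega, ?_⟩
      rw [pow_one]
      omega
    · obtain ⟨k, hk, he⟩ := ih (x / 10) (Nat.div_lt_self (by omega) (by norm_num)) c hc
      refine ⟨k + 1, by omega, ?_⟩
      have hp : (10:Nat) ^ (k + 1) = 10 * 10 ^ k := by rw [pow_succ']
      rw [he, Nat.div_div_eq_div_mul, hp]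

lemma descN_child : ∀ (x c : Nat), descN c x = true ↔
    ((x = 10*c+2 ∨ descN (10*c+2) x = true) ∨ (x = 10*c+3 ∨ descN (10*c+3) x = true) ∨
     (x = 10*c+5 ∨ descN (10*c+5) x = true) ∨ (x = 10*c+7 ∨ descN (10*c+7) x = true)) := by
  intro x
  induction x using Nat.strong_induction_on with
  | _ x ih =>
    intro c
    by_cases hx : x = 0
    · subst hx
      constructor
      · intro h; rw [descN] at h; simp at h
      · intro h
        exfalso
        rcases h with (h|h)|(h|h)|(h|h)|(h|h) <;>
          first
            | omega
            | (rw [descN] at h; simp at h)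
    · have hih := fun d => ih (x / 10) (Nat.div_lt_self (by omega) (by norm_num)) d
      constructor
      · intro h
        rw [descN_iff c x hx] at h
        obtain ⟨hd, hc⟩ := h
        rcases hc with hc | hc
        · rcases hd with h2|h3|h5|h7
          · exact Or.inl (Or.inl (by omega))
          · exact Or.inr (Or.inl (Or.inl (by omega)))
          · exact Or.inr (Or.inr (Or.inl (Or.inl (by omega))))
          · exact Or.inr (Or.inr (Or.inr (Or.inl (by omega))))
        · have hq := (hih c).mp hc
          have hstep : ∀ u : Nat, (x / 10 = u ∨ descN u (x / 10) = true) → descN u x = true := by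
            intro u hu
            rw [descN_iff u x hx]
            exact ⟨hd, hu⟩
          rcases hq with (h'|h')|(h'|h')|(h'|h')|(h'|h')
          · exact Or.inl (Or.inr (hstep _ (Or.inl h')))
          · exact Or.inl (Or.inr (hstep _ (Or.inr h')))
          · exact Or.inr (Or.inl (Or.inr (hstep _ (Or.inl h'))))
          · exact Or.inr (Or.inl (Or.inr (hstep _ (Or.inr h'))))
          · exact Or.inr (Or.inr (Or.inl (Or.inr (hstep _ (Or.inl h')))))
          · exact Or.inr (Or.inr (Or.inl (Or.inr (hstep _ (Or.inr h')))))
          · exact Or.inr (Or.inr (Or.inr (Or.inr (hstep _ (Or.inl h')))))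
          · exact Or.inr (Or.inr (Or.inr (Or.inr (hstep _ (Or.inr h')))))
      · intro h
        have hdir : ∀ d : Nat, (d = 2 ∨ d = 3 ∨ d = 5 ∨ d = 7) →
            (x = 10*c+d ∨ descN (10*c+d) x = true) → descN c x = true := by
          intro d hdv hcase
          rcases hcase with hcase | hcase
          · rw [descN_iff c x hx]
            constructor
            · omega
            · left; omega
          · rw [descN_iff _ x hx] at hcase
            obtain ⟨hd', hc'⟩ := hcase
            rw [descN_iff c x hx]
            refine ⟨hd', Or.inr ?_⟩
            apply (hih c).mpr
            rcases hc' with hc' | hc'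
            · rcases hdv with h'|h'|h'|h' <;> subst h'
              · exact Or.inl (Or.inl hc')
              · exact Or.inr (Or.inl (Or.inl hc'))
              · exact Or.inr (Or.inr (Or.inl (Or.inl hc')))
              · exact Or.inr (Or.inr (Or.inr (Or.inl hc')))
            · rcases hdv with h'|h'|h'|h' <;> subst h'
              · exact Or.inl (Or.inr hc')
              · exact Or.inr (Or.inl (Or.inr hc'))
              · exact Or.inr (Or.inr (Or.inl (Or.inr hc')))
              · exact Or.inr (Or.inr (Or.inr (Or.inr hc')))
        rcases h with (h'|h')|(h'|h')|(h'|h')|(h'|h')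
        · exact hdir 2 (by omega) (Or.inl h')
        · exact hdir 2 (by omega) (Or.inr h')
        · exact hdir 3 (by omega) (Or.inl h')
        · exact hdir 3 (by omega) (Or.inr h')
        · exact hdir 5 (by omega) (Or.inl h')
        · exact hdir 5 (by omega) (Or.inr h')
        · exact hdir 7 (by omega) (Or.inl h')
        · exact hdir 7 (by omega) (Or.inr h')

lemma descN_unique (y u v c : Nat) (hu : descN u y = true) (hv : descN v y = true)
    (hu1 : 10*c+2 ≤ u) (hu2 : u ≤ 10*c+7) (hv1 : 10*c+2 ≤ v) (hv2 : v ≤ 10*c+7) : u = v := by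
  obtain ⟨k, hk, hku⟩ := descN_chain y u hu
  obtain ⟨m, hm, hmv⟩ := descN_chain y v hv
  rcases Nat.le_total k m with hkm | hkm
  · rcases Nat.eq_or_lt_of_le hkm with he | hlt
    · rw [hku, hmv, he]
    · have hadd : k + (m - k) = m := by omega
      have hveq : v = u / 10 ^ (m - k) := by
        rw [hku, Nat.div_div_eq_div_mul, ← pow_add, hadd, hmv]
      have hle : v ≤ u / 10 := by
        rw [hveq]
        calc u / 10 ^ (m - k) ≤ u / 10 ^ 1 :=
              Nat.div_le_div_left (Nat.pow_le_pow_right (by norm_num) (by omega)) (by positivity)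
        _ = u / 10 := by rw [pow_one]
      omega
  · rcases Nat.eq_or_lt_of_le hkm with he | hlt
    · rw [hku, hmv, he]
    · have hadd : m + (k - m) = k := by omega
      have hueq : u = v / 10 ^ (k - m) := by
        rw [hmv, Nat.div_div_eq_div_mul, ← pow_add, hadd, hku]
      have hle : u ≤ v / 10 := by
        rw [hueq]
        calc v / 10 ^ (k - m) ≤ v / 10 ^ 1 :=
              Nat.div_le_div_left (Nat.pow_le_pow_right (by norm_num) (by omega)) (by positivity)
        _ = v / 10 := by rw [pow_one]
      omega

lemma FS_empty (a b c : Int) (hc : 0 ≤ c) (hb : b < 10*c + 2) : FS a b c = ∅ := by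
  ext y
  rw [mem_FS]
  simp only [Finset.notMem_empty, iff_false]
  rintro ⟨⟨ha, hyb⟩, hdesc, _⟩
  have := descN_lb y.toNat c.toNat hdesc
  omega

lemma body_eq (f : Nat) (a b : Int) (t x : Int) :
    (if x ≤ b then (if a ≤ x && isprimeB x then t + 1 else t) + goB f a b x else t)
      = t + contrib f a b x := by
  unfold contrib
  split_ifs <;> ring

lemma goB_succ (f : Nat) (a b c : Int) :
    goB (f+1) a b c = contrib f a b (c*10+2) + contrib f a b (c*10+3)
      + contrib f a b (c*10+5) + contrib f a b (c*10+7) := by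
  show List.foldl _ 0 [2,3,5,7] = _
  simp only [List.foldl]
  rw [body_eq, body_eq, body_eq, body_eq]
  ring

lemma GS_empty (a b x : Int) (hx : 0 ≤ x) (hxb : b < x) : GS a b x = ∅ := by
  ext y
  rw [mem_GS]
  simp only [Finset.notMem_empty, iff_false]
  rintro ⟨⟨ha, hyb⟩, hd, _⟩
  rcases hd with hd | hd
  · omega
  · have := descN_lb y.toNat x.toNat hd
    omega

lemma contrib_card (f : Nat) (a b x : Int) (hx : 0 ≤ x)
    (hgo : goB f a b x = ((FS a b x).card : Int)) :
    contrib f a b x = ((GS a b x).card : Int) := by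
  by_cases hxb : x ≤ b
  · have hsplit : GS a b x
        = (if a ≤ x ∧ isprimeB x = true then ({x} : Finset ℤ) else ∅) ∪ FS a b x := by
      ext y
      rw [Finset.mem_union, mem_GS, mem_FS]
      constructor
      · rintro ⟨⟨ha, hyb⟩, hd, hp⟩
        rcases hd with hd | hd
        · left
          subst hd
          rw [if_pos ⟨ha, hp⟩]
          exact Finset.mem_singleton_self y
        · right
          exact ⟨⟨ha, hyb⟩, hd, hp⟩
      · rintro (hy | ⟨⟨ha, hyb⟩, hd, hp⟩)
        · split_ifs at hy with hcond
          · rw [Finset.mem_singleton] at hy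
            subst hy
            exact ⟨⟨hcond.1, hxb⟩, Or.inl rfl, hcond.2⟩
          · exact absurd hy (Finset.notMem_empty y)
        · exact ⟨⟨ha, hyb⟩, Or.inr hd, hp⟩
    have hdisj : Disjoint (if a ≤ x ∧ isprimeB x = true then ({x} : Finset ℤ) else ∅) (FS a b x) := by
      rw [Finset.disjoint_left]
      intro y hy hy'
      rw [mem_FS] at hy'
      obtain ⟨_, hd, _⟩ := hy'
      have := descN_lb y.toNat x.toNat hd
      split_ifs at hy with hcond
      · rw [Finset.mem_singleton] at hy
        omega
      · exact absurd hy (Finset.notMem_empty y)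
    rw [hsplit, Finset.card_union_of_disjoint hdisj]
    unfold contrib
    rw [if_pos hxb, hgo]
    push_cast
    congr 1
    by_cases hcond : a ≤ x ∧ isprimeB x = true
    · rw [if_pos hcond, if_pos (by simp [hcond.1, hcond.2]), Finset.card_singleton]
      norm_num
    · rw [if_neg hcond, if_neg (by intro hcc; rw [Bool.and_eq_true] at hcc; exact hcond ⟨by simpa using hcc.1, hcc.2⟩)]
      simp
  · unfold contrib
    rw [if_neg hxb, GS_empty a b x hx (by omega)]
    simp

lemma toNat_child (c : Int) (hc : 0 ≤ c) (d : Nat) : (c*10 + (d:Int)).toNat = 10 * c.toNat + d := by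
  omega

lemma FS_eq_union (a b c : Int) (hc : 0 ≤ c) :
    FS a b c = ((GS a b (c*10+2) ∪ GS a b (c*10+3)) ∪ GS a b (c*10+5)) ∪ GS a b (c*10+7) := by
  ext y
  simp only [Finset.mem_union, mem_FS, mem_GS]
  have h2 : (c*10+2).toNat = 10 * c.toNat + 2 := by omega
  have h3 : (c*10+3).toNat = 10 * c.toNat + 3 := by omega
  have h5 : (c*10+5).toNat = 10 * c.toNat + 5 := by omega
  have h7 : (c*10+7).toNat = 10 * c.toNat + 7 := by omega
  constructor
  · rintro ⟨hab, hd, hp⟩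
    have hy0 : y.toNat ≠ 0 := by
      intro he; rw [he, descN] at hd; simp at hd
    have hq := (descN_child y.toNat c.toNat).mp hd
    rcases hq with (h'|h')|(h'|h')|(h'|h')|(h'|h')
    · exact Or.inl (Or.inl (Or.inl ⟨hab, Or.inl (by omega), hp⟩))
    · exact Or.inl (Or.inl (Or.inl ⟨hab, Or.inr (by rw [h2]; exact h'), hp⟩))
    · exact Or.inl (Or.inl (Or.inr ⟨hab, Or.inl (by omega), hp⟩))
    · exact Or.inl (Or.inl (Or.inr ⟨hab, Or.inr (by rw [h3]; exact h'), hp⟩))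
    · exact Or.inl (Or.inr ⟨hab, Or.inl (by omega), hp⟩)
    · exact Or.inl (Or.inr ⟨hab, Or.inr (by rw [h5]; exact h'), hp⟩)
    · exact Or.inr ⟨hab, Or.inl (by omega), hp⟩
    · exact Or.inr ⟨hab, Or.inr (by rw [h7]; exact h'), hp⟩
  · intro h
    have back : ∀ (d : Nat), (d = 2 ∨ d = 3 ∨ d = 5 ∨ d = 7) →
        ((a ≤ y ∧ y ≤ b) ∧ ((y = c*10+(d:Int) ∨ descN (c*10+(d:Int)).toNat y.toNat = true) ∧ isprimeB y = true)) →
        ((a ≤ y ∧ y ≤ b) ∧ (descN c.toNat y.toNat = true ∧ isprimeB y = true)) := by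
      rintro d hdv ⟨hab, hd, hp⟩
      refine ⟨hab, ?_, hp⟩
      apply (descN_child y.toNat c.toNat).mpr
      have harg : (c*10+(d:Int)).toNat = 10 * c.toNat + d := toNat_child c hc d
      rcases hd with hd | hd
      · have hyv : y.toNat = 10 * c.toNat + d := by omega
        rcases hdv with h'|h'|h'|h' <;> subst h'
        · exact Or.inl (Or.inl hyv)
        · exact Or.inr (Or.inl (Or.inl hyv))
        · exact Or.inr (Or.inr (Or.inl (Or.inl hyv)))
        · exact Or.inr (Or.inr (Or.inr (Or.inl hyv)))
      · rw [harg] at hd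
        rcases hdv with h'|h'|h'|h' <;> subst h'
        · exact Or.inl (Or.inr hd)
        · exact Or.inr (Or.inl (Or.inr hd))
        · exact Or.inr (Or.inr (Or.inl (Or.inr hd)))
        · exact Or.inr (Or.inr (Or.inr (Or.inr hd)))
    rcases h with ((h'|h')|h')|h'
    · exact back 2 (by omega) (by exact_mod_cast h')
    · exact back 3 (by omega) (by exact_mod_cast h')
    · exact back 5 (by omega) (by exact_mod_cast h')
    · exact back 7 (by omega) (by exact_mod_cast h')

lemma GS_disj (a b c : Int) (hc : 0 ≤ c) (d d' : Int)
    (hd2 : 2 ≤ d) (hd7 : d ≤ 7) (hd2' : 2 ≤ d') (hd7' : d' ≤ 7) (hne : d ≠ d') :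
    Disjoint (GS a b (c*10+d)) (GS a b (c*10+d')) := by
  rw [Finset.disjoint_left]
  intro y hy hy'
  rw [mem_GS] at hy hy'
  obtain ⟨hab, h1, hp⟩ := hy
  obtain ⟨_, h2, _⟩ := hy'
  rcases h1 with h1 | h1 <;> rcases h2 with h2 | h2
  · omega
  · have := descN_lb y.toNat (c*10+d').toNat h2
    omega
  · have := descN_lb y.toNat (c*10+d).toNat h1
    omega
  · have := descN_unique y.toNat (c*10+d).toNat (c*10+d').toNat c.toNat h1 h2
      (by omega) (by omega) (by omega) (by omega)
    omega

lemma goB_eq : ∀ (f : Nat) (a b c : Int), 0 ≤ c → b < (10*c+2) * 10^f →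
    goB f a b c = ((FS a b c).card : Int) := by
  intro f
  induction f with
  | zero =>
    intro a b c hc hb
    rw [FS_empty a b c hc (by simpa using hb)]
    simp [goB]
  | succ f ih =>
    intro a b c hc hb
    have hpow : (0:Int) < 10 ^ f := by positivity
    have hb' : ∀ d : Int, 2 ≤ d → d ≤ 7 → b < (10*(c*10+d)+2) * 10^f := by
      intro d h2 h7
      have h1 : (10*c+2) * 10^(f+1) = ((10*c+2)*10) * 10^f := by ring
      have h2' : ((10*c+2)*10 : Int) ≤ 10*(c*10+d)+2 := by omega
      calc b < (10*c+2) * 10^(f+1) := hb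
      _ = ((10*c+2)*10) * 10^f := h1
      _ ≤ (10*(c*10+d)+2) * 10^f := by
            exact mul_le_mul_of_nonneg_right h2' (by omega)
    have hcd : ∀ d : Int, 2 ≤ d → (0:Int) ≤ c*10+d := by intro d h2; omega
    rw [goB_succ,
      contrib_card f a b (c*10+2) (hcd 2 (by omega)) (ih a b _ (hcd 2 (by omega)) (hb' 2 (by omega) (by omega))),
      contrib_card f a b (c*10+3) (hcd 3 (by omega)) (ih a b _ (hcd 3 (by omega)) (hb' 3 (by omega) (by omega))),
      contrib_card f a b (c*10+5) (hcd 5 (by omega)) (ih a b _ (hcd 5 (by omega)) (hb' 5 (by omega) (by omega))),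
      contrib_card f a b (c*10+7) (hcd 7 (by omega)) (ih a b _ (hcd 7 (by omega)) (hb' 7 (by omega) (by omega))),
      FS_eq_union a b c hc]
    have d23 := GS_disj a b c hc 2 3 (by omega) (by omega) (by omega) (by omega) (by omega)
    have d25 := GS_disj a b c hc 2 5 (by omega) (by omega) (by omega) (by omega) (by omega)
    have d27 := GS_disj a b c hc 2 7 (by omega) (by omega) (by omega) (by omega) (by omega)
    have d35 := GS_disj a b c hc 3 5 (by omega) (by omega) (by omega) (by omega) (by omega)
    have d37 := GS_disj a b c hc 3 7 (by omega) (by omega) (by omega) (by omega) (by omega)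
    have d57 := GS_disj a b c hc 5 7 (by omega) (by omega) (by omega) (by omega) (by omega)
    rw [Finset.card_union_of_disjoint (by
        rw [Finset.disjoint_union_left]
        exact ⟨by rw [Finset.disjoint_union_left]; exact ⟨d27, d37⟩, d57⟩),
      Finset.card_union_of_disjoint (by
        rw [Finset.disjoint_union_left]
        exact ⟨d25, d35⟩),
      Finset.card_union_of_disjoint d23]
    push_cast
    ring

lemma pred_eq (j : Int) :
    (isprimeA j && digitsOK (PySem.Int.toChars j)) = (descN 0 j.toNat && isprimeB j) := by
  rw [isprime_eq]
  cases hp : isprimeB j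
  · simp
  · have hj : 2 ≤ j := isprimeB_two_le j hp
    rw [toChars_nonneg j (by omega), digitsOK_dchars j.toNat (by omega)]
    simp

-- ===== VERDICT (by name: the statement is the Claim_ definition above) =====
theorem megaprime_count_spec : Claim_equal_megaprime_count := by
  intro a b _
  unfold Spec_megaprime_count megaprime_count megaprime_count_alt
  have hfun : (fun (count j : Int) =>
      if isprimeA j then
        if digitsOK (PySem.Int.toChars j) then count + 1 else count
      else count)
      = (fun (count j : Int) =>
          if (descN (0:Int).toNat j.toNat && isprimeB j) then count + 1 else count) := by
    funext count j
    rw [Int.toNat_zero, ← pred_eq j]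
    by_cases h1 : isprimeA j <;> by_cases h2 : digitsOK (PySem.Int.toChars j) <;>
      simp [h1, h2]
  rw [hfun, PySem.List.foldl_if_add_one, zero_add]
  have hnodup := (PySem.List.nodup_pyRange_one a (b+1)).filter
    (fun y => descN (0:Int).toNat y.toNat && isprimeB y)
  have hcard : (FS a b 0).card
      = ((PySem.List.pyRange a (b+1)).filter
          (fun y => descN (0:Int).toNat y.toNat && isprimeB y)).length := by
    exact List.toFinset_card_of_nodup hnodup
  rw [List.countP_eq_length_filter]
  have hfuel : b < (10*0+2) * 10^(b.toNat+1) := by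
    have h1 : b ≤ (b.toNat : Int) := Int.self_le_toNat b
    have h2 : b.toNat < 10 ^ (b.toNat+1) :=
      lt_of_lt_of_le (Nat.lt_pow_self (by norm_num))
        (Nat.pow_le_pow_right (by norm_num) (by omega))
    have h3 : ((b.toNat : Int)) < (10:Int) ^ (b.toNat+1) := by exact_mod_cast h2
    have h4 : (0:Int) < 10 ^ (b.toNat+1) := by positivity
    omega
  rw [goB_eq (b.toNat+1) a b 0 (by omega) hfuel, hcard]
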